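-- pv_equiv track=rewrite | github.com/tzookb/programming-challenges | exercises/leetcode/reordered-power-of-2/sol.py | getPossiblePowers
-- ===== SOURCE A (Python) =====
-- from typing import List
--
-- def getPossiblePowers(size: int) -> List[int]:
--     cur_size = 1
--     cur = 1
--     options = []
--
--     while cur_size <= size:
--         if cur_size == size:
--             options.append(cur)
--         cur *= 2
--         cur_size = len(str(cur))
--     return options
-- ===== SOURCE B (Python) =====
-- from typing import List
--
-- def getPossiblePowers(size: int) -> List[int]:
--     # Jump straight to the exponent range: 2**k has exactly `size` digits
--     # iff 10**(size-1) <= 2**k < 10**size.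
--     if size < 1:
--         return []
--     lo = (10 ** (size - 1) - 1).bit_length()   # smallest k with 2**k >= 10**(size-1)
--     hi = (10 ** size - 1).bit_length()         # smallest k with 2**k >= 10**size
--     return [1 << k for k in range(lo, hi)]
-- ===== Notes on version B (the rewrite author's own statement) =====
-- stated objective: faster
-- what changed: Instead of doubling from one and re-measuring len(str(cur)) for every power of two below the target range, B computes the exact exponent window with bit_length of the decimal bounds and emits only the size-digit powers directly.
import Mathlib
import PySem

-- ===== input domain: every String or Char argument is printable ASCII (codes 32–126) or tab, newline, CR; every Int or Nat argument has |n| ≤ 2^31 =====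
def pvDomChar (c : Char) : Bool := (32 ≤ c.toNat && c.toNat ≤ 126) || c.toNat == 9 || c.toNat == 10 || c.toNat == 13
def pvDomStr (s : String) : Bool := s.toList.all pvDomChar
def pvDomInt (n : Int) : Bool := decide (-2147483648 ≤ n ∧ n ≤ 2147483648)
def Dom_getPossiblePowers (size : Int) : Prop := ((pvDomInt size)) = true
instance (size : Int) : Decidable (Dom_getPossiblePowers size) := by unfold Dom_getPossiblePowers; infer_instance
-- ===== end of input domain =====

-- B replaces A's digit-counting doubling loop by a direct jump (via bit_length) to the
-- exact exponent window of the size-digit powers of two; measurably faster for large size.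

-- ===== PORT A =====

-- Exact length of Nat.toDigitsCore (needed by aLoop's termination proof below).
lemma toDigitsCore_len_exact (b : ℕ) (hb : 2 ≤ b) :
    ∀ (f n : ℕ) (l : List Char), 0 < f → n < b ^ f →
      (Nat.toDigitsCore b f n l).length = Nat.log b n + 1 + l.length := by
  intro f
  induction f with
  | zero => intro n l hf h; omega
  | succ f ih =>
    intro n l _ h
    simp only [Nat.toDigitsCore]
    by_cases hnb : n / b = 0
    · have hlt : n < b := (Nat.div_eq_zero_iff_lt (by omega)).mp hnb
      have : Nat.log b n = 0 := Nat.log_eq_zero_iff.mpr (Or.inl hlt)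
      simp [hnb, this]; omega
    · have hble : b ≤ n := by
        by_contra hc
        exact hnb (Nat.div_eq_of_lt (by omega))
      have hdiv : n / b < b ^ f := by
        have := (Nat.div_lt_iff_lt_mul (by omega : 0 < b)).mpr
          (by rwa [← pow_succ] : n < b ^ f * b)
        exact this
      have hlog : Nat.log b (n / b) = Nat.log b n - 1 := Nat.log_div_base b n
      have hpos : 0 < Nat.log b n := Nat.log_pos (by omega) hble
      simp only [hnb, if_false]
      have hfpos : 0 < f := by
        rcases Nat.eq_zero_or_pos f with hf0 | hf0
        · subst hf0; simp at hdiv; omega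
        · exact hf0
      rw [ih (n / b) _ hfpos hdiv]
      simp only [List.length_cons]
      omega

-- str(n) for n ≥ 1 has exactly log10(n)+1 characters (needed by aLoop's termination proof).
lemma strlen_pos (n : Int) (h : 1 ≤ n) :
    PySem.Str.len (PySem.Int.toStr n) = (Nat.log 10 n.toNat : Int) + 1 := by
  have hnn : ¬ n < 0 := by omega
  have hlist : (PySem.Int.toStr n).toList = PySem.Int.toChars n := PySem.Int.toList_toStr n
  rw [PySem.Str.len_eq, hlist]
  simp only [PySem.Int.toChars, hnn, if_false]
  have hfuel : n.toNat < 10 ^ (n.toNat + 1) :=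
    lt_of_lt_of_le (Nat.lt_pow_self (by omega)) (Nat.pow_le_pow_right (by omega) (by omega))
  rw [show Nat.toDigits 10 n.toNat = Nat.toDigitsCore 10 (n.toNat + 1) n.toNat [] from rfl,
    toDigitsCore_len_exact 10 (by omega) _ _ _ (by omega) hfuel]
  simp

-- the while loop of A: cur_size is recomputed as len(str(cur)) (its loop invariant in A)
def aLoop (size cur : Int) (hcur : 1 ≤ cur) (options : List Int) : List Int :=
  let curSize := PySem.Str.len (PySem.Int.toStr cur)
  if h : curSize ≤ size then
    aLoop size (cur * 2) (by omega) (if curSize = size then options ++ [cur] else options)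
  else options
termination_by (2 * 10 ^ size.toNat - cur).toNat
decreasing_by
  have hs := strlen_pos cur hcur
  have h : PySem.Str.len (PySem.Int.toStr cur) ≤ size := h
  rw [hs] at h
  have hlog : Nat.log 10 cur.toNat < size.toNat := by omega
  have hlt : cur.toNat < 10 ^ size.toNat :=
    (Nat.log_lt_iff_lt_pow (by omega) (by omega)).mp hlog
  have hlt' : cur < (10 : Int) ^ size.toNat := by
    have h1 : ((cur.toNat : Int)) < (((10 ^ size.toNat : Nat)) : Int) := by exact_mod_cast hlt
    push_cast at h1
    omega
  omega

def getPossiblePowers (size : Int) : List Int :=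
  aLoop size 1 (by omega) []

-- ===== PORT B =====
def getPossiblePowers_alt (size : Int) : List Int :=
  if size < 1 then []
  else
    let lo : Int := (Nat.size ((10 : Nat) ^ (size - 1).toNat - 1) : Nat)
    let hi : Int := (Nat.size ((10 : Nat) ^ size.toNat - 1) : Nat)
    (PySem.List.pyRange lo hi 1).map (fun k => (2 : Int) ^ k.toNat)  -- 1 << k

-- ===== PRECONDITION & SPEC =====
def Spec_getPossiblePowers (size : Int) (out : List Int) : Prop := out = getPossiblePowers_alt size
instance (size : Int) (out : List Int) : Decidable (Spec_getPossiblePowers size out) := by unfold Spec_getPossiblePowers; infer_instance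

-- ===== CLAIM (what is proved, stated in full; the proofs are below) =====
def Claim_equal_getPossiblePowers : Prop := ∀ (size : Int), Dom_getPossiblePowers size → Spec_getPossiblePowers size (getPossiblePowers size)

-- ===== LEMMAS AND PROOFS =====

-- digit-count tests of A at cur = 2^k, rephrased as the bit_length window bounds of B
lemma pow2_digit_facts (size : Int) (hsz : 1 ≤ size) (k : ℕ) :
    (PySem.Str.len (PySem.Int.toStr ((2 : Int) ^ k)) ≤ size ↔
        k < Nat.size ((10 : Nat) ^ size.toNat - 1)) ∧
    (PySem.Str.len (PySem.Int.toStr ((2 : Int) ^ k)) = size ↔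
        (k < Nat.size ((10 : Nat) ^ size.toNat - 1) ∧
         Nat.size ((10 : Nat) ^ (size.toNat - 1) - 1) ≤ k)) := by
  have hlen := strlen_pos ((2 : Int) ^ k) (one_le_pow₀ (by omega))
  have htn : ((2 : Int) ^ k).toNat = 2 ^ k := by
    rw [show ((2 : Int) ^ k) = ((2 ^ k : Nat) : Int) by push_cast; ring, Int.toNat_natCast]
  rw [htn] at hlen
  have h2k : (2 : Nat) ^ k ≠ 0 := by positivity
  have e1 : Nat.log 10 (2 ^ k) < size.toNat ↔ 2 ^ k < 10 ^ size.toNat :=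
    Nat.log_lt_iff_lt_pow (by omega) h2k
  have e2 : Nat.log 10 (2 ^ k) < size.toNat - 1 ↔ 2 ^ k < 10 ^ (size.toNat - 1) :=
    Nat.log_lt_iff_lt_pow (by omega) h2k
  have e3 : k < Nat.size ((10 : Nat) ^ size.toNat - 1) ↔ 2 ^ k ≤ 10 ^ size.toNat - 1 :=
    Nat.lt_size
  have e4 : k < Nat.size ((10 : Nat) ^ (size.toNat - 1) - 1) ↔
      2 ^ k ≤ 10 ^ (size.toNat - 1) - 1 := Nat.lt_size
  have hp1 : 1 ≤ (10 : Nat) ^ size.toNat := Nat.one_le_pow _ _ (by omega)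
  have hp2 : 1 ≤ (10 : Nat) ^ (size.toNat - 1) := Nat.one_le_pow _ _ (by omega)
  rw [hlen]
  omega

-- A's loop, started at any power 2^k, appends exactly the powers of B's window [lo, hi)
lemma aLoop_spec (size : Int) (hsz : 1 ≤ size) :
    ∀ (m k : ℕ) (cur : Int) (hcur : 1 ≤ cur) (acc : List Int),
      cur = 2 ^ k → Nat.size ((10 : Nat) ^ size.toNat - 1) - k = m →
      aLoop size cur hcur acc =
        acc ++ (List.range' (max k (Nat.size ((10 : Nat) ^ (size.toNat - 1) - 1)))
            ((Nat.size ((10 : Nat) ^ size.toNat - 1)) -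
              max k (Nat.size ((10 : Nat) ^ (size.toNat - 1) - 1)))).map
          (fun j => (2 : Int) ^ j) := by
  intro m
  induction m with
  | zero =>
    intro k cur hcur acc hk hm
    obtain ⟨g1, _⟩ := pow2_digit_facts size hsz k
    rw [aLoop]
    simp only [hk]
    rw [dif_neg (by rw [g1]; omega)]
    have : (Nat.size ((10 : Nat) ^ size.toNat - 1)) -
        max k (Nat.size ((10 : Nat) ^ (size.toNat - 1) - 1)) = 0 := by omega
    rw [this]
    simp
  | succ m ih =>
    intro k cur hcur acc hk hm
    obtain ⟨g1, g2⟩ := pow2_digit_facts size hsz k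
    have hkhi : k < Nat.size ((10 : Nat) ^ size.toNat - 1) := by omega
    rw [aLoop]
    simp only [hk]
    rw [dif_pos (g1.mpr hkhi)]
    have hnext : (2 : Int) ^ k * 2 = 2 ^ (k + 1) := by ring
    rw [ih (k + 1) _ _ _ hnext (by omega)]
    by_cases hlo : Nat.size ((10 : Nat) ^ (size.toNat - 1) - 1) ≤ k
    · rw [if_pos (g2.mpr ⟨hkhi, hlo⟩)]
      rw [max_eq_left hlo, max_eq_left (by omega)]
      have hcnt : (Nat.size ((10 : Nat) ^ size.toNat - 1)) - k =
          ((Nat.size ((10 : Nat) ^ size.toNat - 1)) - (k + 1)) + 1 := by omega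
      rw [hcnt, List.range'_succ]
      simp
    · rw [if_neg (by intro hc; exact hlo (g2.mp hc).2)]
      rw [max_eq_right (by omega), max_eq_right (by omega)]

theorem getPossiblePowers_spec : Claim_equal_getPossiblePowers := by
  intro size _
  unfold Spec_getPossiblePowers getPossiblePowers getPossiblePowers_alt
  by_cases hsz : size < 1
  · rw [aLoop]
    have h1 : PySem.Str.len (PySem.Int.toStr 1) = 1 := by decide
    rw [dif_neg (by rw [h1]; omega)]
    rw [if_pos hsz]
  · rw [if_neg hsz]
    show _ = List.map (fun k => (2 : Int) ^ k.toNat)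
        (PySem.List.pyRange ((Nat.size ((10 : Nat) ^ (size - 1).toNat - 1) : Nat) : Int)
          ((Nat.size ((10 : Nat) ^ size.toNat - 1) : Nat) : Int) 1)
    rw [show (size - 1).toNat = size.toNat - 1 from by omega]
    rw [aLoop_spec size (by omega) (Nat.size ((10 : Nat) ^ size.toNat - 1)) 0 1 (by omega) []
        (by norm_num) (by omega)]
    rw [PySem.List.pyRange_one, List.map_map]
    rw [max_eq_right (Nat.zero_le _)]
    have hcnt : (((Nat.size ((10 : Nat) ^ size.toNat - 1) : Nat) : Int) -
        ((Nat.size ((10 : Nat) ^ (size.toNat - 1) - 1) : Nat) : Int)).toNat =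
        Nat.size ((10 : Nat) ^ size.toNat - 1) -
          Nat.size ((10 : Nat) ^ (size.toNat - 1) - 1) := by omega
    rw [hcnt, List.range'_eq_map_range, List.map_map]
    simp only [List.nil_append]
    apply List.map_congr_left
    intro j _
    simp only [Function.comp_apply]
    have : (((Nat.size ((10 : Nat) ^ (size.toNat - 1) - 1) : Nat) : Int) + (j : Int)).toNat =
        Nat.size ((10 : Nat) ^ (size.toNat - 1) - 1) + j := by omega
    rw [this]
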